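-- pv_equiv track=rewrite | github.com/thenqq/PhotoworkTI_Python | PhotoworkTI_Python.py | binary_to_decim
-- ===== SOURCE A (Python) =====
-- def binary_to_decim(i_a_b): # из бинарной в десятичную
--     img_binary_noice_list = []
--     for i in i_a_b:
--         number_line = []
--         for j in i:
--             number_list = []
--             for k in j:
--                 number = 0
--                 line_two = ''
--                 count = 0
--                 for r in k:
--                     line_two = r + line_two
--                 for r in line_two:
--                     if r == '1':
--                         number += 2 ** count
--                     count += 1
--                 number_list.append(number)
--             number_line.append(number_list)
--         img_binary_noice_list.append(number_line)
--     return img_binary_noice_list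
--     pass
-- ===== SOURCE B (Python) =====
-- def binary_to_decim(i_a_b):
--     def value(k):
--         # one forward Horner pass over the bit characters: within each piece the
--         # chars are read back-to-front, pieces in order; no power accumulator.
--         number = 0
--         for s in k:
--             for r in reversed(s):
--                 number = number * 2 + (1 if r == '1' else 0)
--         return number
--     return [[[value(k) for k in j] for j in i] for i in i_a_b]
-- ===== Notes on version B (the rewrite author's own statement) =====
-- stated objective: simpler
-- what changed: Instead of first building a reversed concatenation of the string pieces and then summing 2**count over its '1' characters with a position counter, B accumulates the same number in one forward Horner pass (number = number*2 + bit) reading each piece's characters back-to-front, with no intermediate string and no power counter; the nested structure is built by comprehensions instead of append loops.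
import Mathlib
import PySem

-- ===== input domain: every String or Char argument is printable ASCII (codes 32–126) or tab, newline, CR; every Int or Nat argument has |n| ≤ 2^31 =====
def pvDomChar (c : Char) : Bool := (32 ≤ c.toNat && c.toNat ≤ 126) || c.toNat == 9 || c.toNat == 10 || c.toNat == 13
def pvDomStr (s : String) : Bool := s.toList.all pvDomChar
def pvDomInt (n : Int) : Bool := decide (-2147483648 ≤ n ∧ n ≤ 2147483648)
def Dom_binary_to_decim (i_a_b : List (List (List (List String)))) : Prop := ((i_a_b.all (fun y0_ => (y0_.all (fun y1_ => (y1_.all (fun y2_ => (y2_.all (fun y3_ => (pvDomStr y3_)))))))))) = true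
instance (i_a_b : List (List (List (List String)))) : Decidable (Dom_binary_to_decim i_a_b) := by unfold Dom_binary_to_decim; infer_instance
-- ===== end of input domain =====

-- B replaces A's build-reversed-string-then-sum-powers bit conversion by a single Horner fold (no intermediate string, no power counter); simpler, same cost.


-- ===== PORT A =====
-- A's inner loops on one k : List String: 'line_two = r + line_two' prepends each whole
-- string (strings ported as their char lists), then the second loop sums 2**count over
-- line_two's '1' characters while incrementing count on every character.
def pvRevLoop (k : List String) : List Char :=
  k.foldl (fun line_two r => r.toList ++ line_two) []

def pvSumLoop (line_two : List Char) : Int × Nat :=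
  line_two.foldl (fun (st : Int × Nat) r =>
    ((if r = '1' then st.1 + 2 ^ st.2 else st.1), st.2 + 1)) (0, 0)

def pvInnerA (k : List String) : Int := (pvSumLoop (pvRevLoop k)).1

def binary_to_decim (i_a_b : List (List (List (List String)))) : List (List (List Int)) :=
  i_a_b.foldl (fun img i =>
    img ++ [i.foldl (fun number_line j =>
      number_line ++ [j.foldl (fun number_list k =>
        number_list ++ [pvInnerA k]) []]) []]) []

-- ===== PORT B =====
-- B: one forward Horner pass (number = number*2 + bit), pieces in order, each piece's
-- characters read back-to-front; nested structure by maps (list comprehensions).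
def pvHorner (k : List String) : Int :=
  k.foldl (fun number s =>
    s.toList.reverse.foldl (fun number r => number * 2 + (if r = '1' then 1 else 0)) number) 0

def binary_to_decim_alt (i_a_b : List (List (List (List String)))) : List (List (List Int)) :=
  i_a_b.map (fun i => i.map (fun j => j.map pvHorner))

-- ===== PRECONDITION & SPEC =====
def Spec_binary_to_decim (i_a_b : List (List (List (List String)))) (out : List (List (List Int))) : Prop := out = binary_to_decim_alt i_a_b
instance (i_a_b : List (List (List (List String)))) (out : List (List (List Int))) : Decidable (Spec_binary_to_decim i_a_b out) := by unfold Spec_binary_to_decim; infer_instance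

-- ===== CLAIM (what is proved, stated in full; the proofs are below) =====
def Claim_equal_binary_to_decim : Prop := ∀ (i_a_b : List (List (List (List String)))), Dom_binary_to_decim i_a_b → Spec_binary_to_decim i_a_b (binary_to_decim i_a_b)

-- ===== LEMMAS AND PROOFS =====

-- position-weighted bit sum: weight 2^c at the head, increasing along the list
def pvPowSum : List Char → Nat → Int
  | [], _ => 0
  | r :: t, c => (if r = '1' then (2 : Int) ^ c else 0) + pvPowSum t (c + 1)

theorem pvRevLoop_eq (k : List String) :
    pvRevLoop k = (k.reverse.map String.toList).flatten := by
  have h : ∀ (k : List String) (acc : List Char),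
      k.foldl (fun line_two r => r.toList ++ line_two) acc
        = (k.reverse.map String.toList).flatten ++ acc := by
    intro k
    induction k with
    | nil => intro acc; simp
    | cons r t ih => intro acc; simp [List.foldl, ih]
  unfold pvRevLoop
  simpa using h k []

theorem pvSumLoop_eq (l : List Char) :
    ∀ (n : Int) (c : Nat),
      List.foldl (fun (st : Int × Nat) r =>
        ((if r = '1' then st.1 + 2 ^ st.2 else st.1), st.2 + 1)) (n, c) l
      = (n + pvPowSum l c, c + l.length) := by
  induction l with
  | nil => intro n c; simp [pvPowSum]
  | cons r t ih =>
    intro n c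
    rw [List.foldl_cons, ih]
    simp only [pvPowSum, Prod.mk.injEq, List.length_cons]
    refine ⟨?_, by omega⟩
    split <;> ring

theorem pvPowSum_append (l₁ l₂ : List Char) (c : Nat) :
    pvPowSum (l₁ ++ l₂) c = pvPowSum l₁ c + pvPowSum l₂ (c + l₁.length) := by
  induction l₁ generalizing c with
  | nil => simp [pvPowSum]
  | cons r t ih =>
    simp only [List.cons_append, pvPowSum, List.length_cons, ih]
    rw [show c + 1 + t.length = c + (t.length + 1) by omega]
    ring

theorem pvPowSum_shift (l : List Char) :
    ∀ c : Nat, pvPowSum l c = 2 ^ c * pvPowSum l 0 := by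
  induction l with
  | nil => intro c; simp [pvPowSum]
  | cons r t ih =>
    intro c
    simp only [pvPowSum, ih (c + 1), ih 1, pow_succ, pow_zero]
    split <;> ring

theorem pvHornerStep_eq (l : List Char) :
    ∀ n : Int,
      List.foldl (fun number r => number * 2 + (if r = '1' then 1 else 0)) n l
      = n * 2 ^ l.length + pvPowSum l.reverse 0 := by
  induction l with
  | nil => intro n; simp [pvPowSum]
  | cons r t ih =>
    intro n
    rw [List.foldl_cons, ih, List.reverse_cons, pvPowSum_append]
    simp only [pvPowSum, List.length_reverse, List.length_cons, Nat.zero_add, pow_succ]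
    split <;> ring

theorem pvHorner_eq_powsum (k : List String) :
    ∀ n : Int,
      List.foldl (fun number s =>
        s.toList.reverse.foldl
          (fun number r => number * 2 + (if r = '1' then 1 else 0)) number) n k
      = n * 2 ^ ((k.map String.toList).flatten).length
        + pvPowSum ((k.reverse.map String.toList).flatten) 0 := by
  induction k with
  | nil => intro n; simp [pvPowSum]
  | cons s t ih =>
    intro n
    rw [List.foldl_cons, ih, pvHornerStep_eq, List.reverse_cons, List.map_append,
        List.flatten_append]
    simp only [List.map_cons, List.flatten_cons, List.map_nil, List.flatten_nil,
      List.append_nil, List.length_append, List.length_reverse, List.reverse_reverse,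
      pvPowSum_append, List.length_flatten]
    simp only [Nat.zero_add]
    rw [pow_add,
        show (List.map List.length (List.map String.toList t.reverse)).sum
            = (List.map List.length (List.map String.toList t)).sum from by
          rw [List.map_reverse, List.map_reverse, List.sum_reverse],
        pvPowSum_shift s.toList ((List.map List.length (List.map String.toList t)).sum)]
    ring

theorem pvInnerA_eq (k : List String) : pvInnerA k = pvHorner k := by
  unfold pvInnerA pvHorner pvSumLoop
  rw [pvRevLoop_eq, pvSumLoop_eq, pvHorner_eq_powsum]
  simp

theorem foldl_append_eq_map {α β : Type} (f : α → β) (l : List α) :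
    l.foldl (fun acc x => acc ++ [f x]) [] = l.map f := by
  have h : ∀ (l : List α) (acc : List β),
      l.foldl (fun acc x => acc ++ [f x]) acc = acc ++ l.map f := by
    intro l
    induction l with
    | nil => intro acc; simp
    | cons x t ih => intro acc; simp [List.foldl, ih]
  simpa using h l []

-- ===== VERDICT (by name: the statement is the Claim_ definition above) =====
theorem binary_to_decim_spec : Claim_equal_binary_to_decim := by
  intro i_a_b _
  unfold Spec_binary_to_decim binary_to_decim binary_to_decim_alt
  rw [foldl_append_eq_map]
  refine List.map_congr_left (fun i _ => ?_)
  rw [foldl_append_eq_map]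
  refine List.map_congr_left (fun j _ => ?_)
  rw [foldl_append_eq_map]
  exact List.map_congr_left (fun k _ => pvInnerA_eq k)
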